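-- pv_equiv track=rewrite | github.com/yihming/insight-challenge | insight_testsuite/temp/src/h1b_counting.py | get_values_from_line
-- ===== SOURCE A (Python) =====
-- def get_values_from_line(line):
--     raw_list = line.strip().split(';')
--     i = 0
--     values = []
--     while i < len(raw_list):
--         if raw_list[i] == "" or raw_list[i][0] != '\"':
--             values.append(raw_list[i])
--             i = i + 1
--         else:
--             if raw_list[i][-1] == '\"':
--                 values.append(raw_list[i][1:-1])
--                 i = i + 1
--             else:
--                 j = i + 1
--                 entry = raw_list[i][1:]
--                 while j < len(raw_list) and raw_list[j][-1] != '\"':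
--                     entry = entry + raw_list[j]
--                     j = j + 1
--                 if j == len(raw_list):
--                     i = j
--                 else:
--                     entry = entry + raw_list[j][:-1]
--                     values.append(entry)
--                     i = j + 1
--
--     return values
-- ===== SOURCE B (Python) =====
-- def get_values_from_line(line):
--     values = []
--     in_quote = False
--     entry = ""
--     for token in line.strip().split(';'):
--         if not in_quote:
--             if not token.startswith('"'):
--                 values.append(token)
--             elif token.endswith('"'):
--                 values.append(token[1:-1])
--             else:
--                 in_quote = True
--                 entry = token[1:]
--         elif token[-1] != '"':
--             entry += token
--         else:
--             values.append(entry + token[:-1])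
--             in_quote = False
--     return values
-- ===== Notes on version B (the rewrite author's own statement) =====
-- stated objective: simpler
-- what changed: Replaces A's index-driven while loop with an inner lookahead-while that stitches quoted groups by a single flat for loop over the tokens maintaining an in_quote flag and an entry accumulator (and startswith/endswith tests instead of positional character probes).
import Mathlib
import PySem

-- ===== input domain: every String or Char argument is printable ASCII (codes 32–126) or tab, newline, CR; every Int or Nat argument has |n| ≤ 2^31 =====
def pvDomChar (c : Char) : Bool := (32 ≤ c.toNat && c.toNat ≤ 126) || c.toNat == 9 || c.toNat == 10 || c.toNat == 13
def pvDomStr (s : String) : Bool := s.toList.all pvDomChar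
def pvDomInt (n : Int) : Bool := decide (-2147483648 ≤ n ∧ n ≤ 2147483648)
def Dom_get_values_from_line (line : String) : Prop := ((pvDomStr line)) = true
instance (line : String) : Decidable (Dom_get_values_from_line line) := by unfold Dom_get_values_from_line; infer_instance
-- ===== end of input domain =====

-- B replaces A's index loop with an inner lookahead-while by a single flat pass keeping an
-- in_quote flag and an entry accumulator (objective: simpler; same exact values and same
-- IndexError behaviour on an empty token inside an open quoted group).

-- ===== PORT A =====
-- A: while over index i; unquoted/closed tokens advance i by 1, an opening token starts an
-- inner while from j = i+1 that stitches tokens until a closing one (or the end, discarding).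
-- Ported as the obvious structural recursion on the token-list suffix (i / j only advance).
-- t[0], t[-1], t[1:-1], t[1:], t[:-1] are ported with PySem.Str.pyGet? / slice (exact;
-- pyGet? t (-1) is none where Python's t[-1] raises on the empty token — excluded by Pre_).
mutual
def pvOuterA : List String → List String
  | [] => []
  | t :: ts =>
    if t = "" ∨ PySem.Str.pyGet? t 0 ≠ some '"' then t :: pvOuterA ts
    else if PySem.Str.pyGet? t (-1) = some '"' then
      PySem.Str.slice t (some 1) (some (-1)) :: pvOuterA ts
    else pvInnerA (PySem.Str.slice t (some 1) none) ts
def pvInnerA : String → List String → List String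
  | _, [] => []
  | entry, u :: us =>
    if PySem.Str.pyGet? u (-1) ≠ some '"' then pvInnerA (entry ++ u) us
    else (entry ++ PySem.Str.slice u none (some (-1))) :: pvOuterA us
end

def get_values_from_line (line : String) : List String :=
  pvOuterA ((PySem.Str.split? (PySem.Str.strip line) ";").getD [])

-- ===== PORT B =====
-- B: one for-loop over the tokens with state (values, in_quote, entry) — ported as a foldl.
def pvStepB (acc : List String × Bool × String) (token : String) : List String × Bool × String :=
  match acc with
  | (values, false, entry) =>
    if ¬ PySem.Str.startswith token "\"" then (values ++ [token], false, entry)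
    else if PySem.Str.endswith token "\"" then
      (values ++ [PySem.Str.slice token (some 1) (some (-1))], false, entry)
    else (values, true, PySem.Str.slice token (some 1) none)
  | (values, true, entry) =>
    if PySem.Str.pyGet? token (-1) ≠ some '"' then (values, true, entry ++ token)
    else (values ++ [entry ++ PySem.Str.slice token none (some (-1))], false, "")

def get_values_from_line_alt (line : String) : List String :=
  (List.foldl pvStepB ([], false, "") ((PySem.Str.split? (PySem.Str.strip line) ";").getD [])).1

-- ===== PRECONDITION & SPEC =====
-- A token opens a quoted group iff it starts with '"' and does not end with '"'.
def pvOpensB (t : String) : Bool :=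
  PySem.Str.startswith t "\"" && !PySem.Str.endswith t "\""

-- Pre_ excludes exactly the lines on which Python A raises IndexError (raw_list[j][-1] on an
-- empty token inside an open quoted group): every empty token that comes after an opening
-- token must have a token ending in '"' strictly between them (which closes the group first).
def Pre_get_values_from_line (line : String) : Prop :=
  ((List.range ((PySem.Str.split? (PySem.Str.strip line) ";").getD []).length).all fun k =>
    ((PySem.Str.split? (PySem.Str.strip line) ";").getD []).getD k "" != "" ||
    (List.range k).all fun i =>
      !pvOpensB (((PySem.Str.split? (PySem.Str.strip line) ";").getD []).getD i "") ||
      (List.range k).any fun m =>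
        decide (i < m) &&
          PySem.Str.endswith (((PySem.Str.split? (PySem.Str.strip line) ";").getD []).getD m "") "\"") = true
instance (line : String) : Decidable (Pre_get_values_from_line line) := by
  unfold Pre_get_values_from_line; infer_instance

def pvWitness_get_values_from_line : String := "a;\"b; c\";d"

def Spec_get_values_from_line (line : String) (out : List String) : Prop := out = get_values_from_line_alt line
instance (line : String) (out : List String) : Decidable (Spec_get_values_from_line line out) := by unfold Spec_get_values_from_line; infer_instance

-- ===== CLAIM (what is proved, stated in full; the proofs are below) =====
def Claim_equal_get_values_from_line : Prop := ∀ (line : String), Dom_get_values_from_line line → Pre_get_values_from_line line → Spec_get_values_from_line line (get_values_from_line line)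

-- ===== LEMMAS AND PROOFS =====

-- t[-1] (A's last-character probe) is the list getLast?.
theorem pv_last_eq (t : String) : PySem.Str.pyGet? t (-1) = t.toList.getLast? := by
  rcases h : t.toList with _ | ⟨c, cs⟩ <;>
    simp [PySem.Str.pyGet?, h, PySem.List.pyGet?, PySem.List.pyIdx?, List.getLast?_eq_getElem?]

-- B's startswith test is the negation of A's 'token == "" or token[0] != '"'' test.
theorem pv_start_iff (t : String) :
    (¬ PySem.Str.startswith t "\"") ↔ (t = "" ∨ PySem.Str.pyGet? t 0 ≠ some '"') := by
  have he : t = "" ↔ t.toList = [] := by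
    constructor
    · intro h; simp [h]
    · intro h; exact String.ext (by simpa using h)
  simp only [PySem.Str.startswith_eq, PySem.Str.pyGet?_eq, PySem.Chars.pyGet?_eq_listPyGet?,
    PySem.Chars.startswith_iff, he]
  rcases t.toList with _ | ⟨c, cs⟩ <;>
    simp [PySem.List.pyGet?, PySem.List.pyIdx?, List.cons_prefix_iff, eq_comm]

-- B's endswith test equals A's 'token[-1] == '"'' test (both false on the empty token).
theorem pv_end_iff (t : String) :
    (PySem.Str.endswith t "\"" = true) ↔ (PySem.Str.pyGet? t (-1) = some '"') := by
  rw [pv_last_eq, List.getLast?_eq_some_iff]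
  simp only [PySem.Str.endswith_eq, PySem.Chars.endswith_iff]
  constructor
  · rintro ⟨l, h⟩; exact ⟨l, by simpa using h.symm⟩
  · rintro ⟨l, h⟩; exact ⟨l, by simp [← h]⟩

-- B's fold over the remaining tokens produces exactly what A's two loops produce there.
theorem pv_foldl_eq (ts : List String) : ∀ (vs : List String) (q : Bool) (e : String),
    (List.foldl pvStepB (vs, q, e) ts).1
      = vs ++ (if q then pvInnerA e ts else pvOuterA ts) := by
  induction ts with
  | nil => intro vs q e; cases q <;> simp [pvOuterA, pvInnerA]
  | cons t ts ih =>
    intro vs q e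
    cases q with
    | false =>
      by_cases h1 : PySem.Chars.startswith t.toList ['"'] = false
      · have hA : t = "" ∨ ¬ PySem.List.pyGet? t.toList 0 = some '"' := by
          have := (pv_start_iff t).mp (by simp [h1])
          simpa using this
        simp [pvStepB, h1, hA, pvOuterA, ih]
      · have hA : ¬ (t = "" ∨ ¬ PySem.List.pyGet? t.toList 0 = some '"') := by
          intro h
          exact h1 (by simpa using (pv_start_iff t).mpr (by simpa using h))
        by_cases h2 : PySem.Chars.endswith t.toList ['"'] = true
        · have hB : PySem.List.pyGet? t.toList (-1) = some '"' := by
            simpa using (pv_end_iff t).mp (by simpa using h2)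
          simp [pvStepB, h1, h2, hA, hB, pvOuterA, ih]
        · have hB : ¬ PySem.List.pyGet? t.toList (-1) = some '"' := by
            intro h
            exact h2 (by simpa using (pv_end_iff t).mpr (by simpa using h))
          simp [pvStepB, h1, h2, hA, hB, pvOuterA, ih]
    | true =>
      by_cases h2 : PySem.List.pyGet? t.toList (-1) = some '"'
      · simp [pvStepB, h2, pvInnerA, ih]
      · simp [pvStepB, h2, pvInnerA, ih]

-- ===== VERDICT (by name: the statement is the Claim_ definition above) =====
theorem get_values_from_line_spec : Claim_equal_get_values_from_line := by
  intro line _ _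
  unfold Spec_get_values_from_line get_values_from_line get_values_from_line_alt
  rw [pv_foldl_eq]
  simp
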